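-- pv_equiv track=rewrite | github.com/boristown/leetcode | Graph/maxDConnectedArea.py | maxDConnectedArea
-- ===== SOURCE A (Python) =====
-- def maxDConnectedArea(G):
--     '''
--     计算有向图的最大连通区域
--     :param G:example [[set(),set([1,2])],[set(0),set()],[set(0),set()]]
--     '''
--     n=len(G)
--     def dfs(i):
--         if G[i][1]:
--             for j in G[i][1]:
--                 if j not in vis:
--                     vis.add(j)
--                     dfs(j)
--     ans=0
--     for i in range(n):
--         vis = {i}
--         dfs(i)
--         ans=max(ans,len(vis))
--     return ans
-- ===== SOURCE B (Python) =====
-- def maxDConnectedArea(G):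
--     ans = 0
--     for i in range(len(G)):
--         vis = {i}
--         while True:
--             new = vis | {k for j in vis for k in G[j][1]}
--             if new == vis:
--                 break
--             vis = new
--         ans = max(ans, len(vis))
--     return ans
-- ===== Notes on version B (the rewrite author's own statement) =====
-- stated objective: alternative
-- what changed: The recursive closure-capturing dfs is replaced by per-source fixed-point saturation: repeatedly union the visited set with all successors of its members until it stops growing; no recursion and no stack, only set union iterated to a fixpoint.
import Mathlib
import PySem

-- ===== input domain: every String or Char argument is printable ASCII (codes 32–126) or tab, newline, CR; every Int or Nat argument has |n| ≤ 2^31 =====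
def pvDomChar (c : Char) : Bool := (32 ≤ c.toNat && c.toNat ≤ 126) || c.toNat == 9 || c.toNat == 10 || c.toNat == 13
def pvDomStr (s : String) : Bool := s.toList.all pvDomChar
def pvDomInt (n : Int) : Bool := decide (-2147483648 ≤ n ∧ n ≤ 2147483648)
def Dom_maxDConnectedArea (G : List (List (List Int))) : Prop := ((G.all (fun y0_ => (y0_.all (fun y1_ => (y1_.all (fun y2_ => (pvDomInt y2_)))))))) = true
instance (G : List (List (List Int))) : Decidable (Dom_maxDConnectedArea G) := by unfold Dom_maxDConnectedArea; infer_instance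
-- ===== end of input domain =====

-- B replaces A's recursive dfs by per-source fixed-point saturation (repeatedly union the visited
-- set with all successors of its members until it stops growing); same visited sets per source,
-- same max.  Both ports are fuel-based transliterations (fuel 2*n+2 is a totality guard only,
-- proved sufficient under Pre_).

-- G[i][1] as both Pythons read it (exact under Pre_, where every index hit is in range)
def succOf (G : List (List (List Int))) (i : Int) : List Int :=
  PySem.List.pyGetD (PySem.List.pyGetD G i []) 1 []

-- ===== PORT A =====
-- A's dfs(i): for j in G[i][1]: if j not in vis: vis.add(j); dfs(j)
def dfsA (G : List (List (List Int))) : Nat → Int → List Int → List Int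
  | 0, _, vis => vis
  | fuel+1, i, vis =>
    (succOf G i).foldl
      (fun v j => if j ∈ v then v else dfsA G fuel j (PySem.Set.add v j)) vis

def maxDConnectedArea (G : List (List (List Int))) : Int :=
  let n := G.length
  (PySem.List.pyRange 0 (n : Int) 1).foldl
    (fun ans i => max ans ((dfsA G (2*n+2) i [i]).length : Int)) 0

-- ===== PORT B =====
-- one saturation round: vis | {k for j in vis for k in G[j][1]} (as a PySem.Set, built by adding
-- every successor of every member of vis to vis)
def satStep (G : List (List (List Int))) (vis : List Int) : List Int :=
  vis.foldl (fun acc j => (succOf G j).foldl PySem.Set.add acc) vis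

-- the while-True loop: stop when the round adds nothing (new == vis; since satStep only appends
-- fresh elements to vis, Python's set equality is exactly list equality here)
def satB (G : List (List (List Int))) : Nat → List Int → List Int
  | 0, vis => vis
  | fuel+1, vis =>
    let new := satStep G vis
    if new = vis then vis else satB G fuel new

def maxDConnectedArea_alt (G : List (List (List Int))) : Int :=
  let n := G.length
  (PySem.List.pyRange 0 (n : Int) 1).foldl
    (fun ans i => max ans ((satB G (2*n+2) [i]).length : Int)) 0

-- ===== PRECONDITION & SPEC =====
-- Exactly where the Python A returns: every row has an index-1 entry and every successor label
-- is an in-range (possibly negative, Python-style) index; otherwise A raises IndexError.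
def Pre_maxDConnectedArea (G : List (List (List Int))) : Prop :=
  ∀ row ∈ G, 2 ≤ row.length ∧
    ∀ j ∈ PySem.List.pyGetD row 1 [], -(G.length : Int) ≤ j ∧ j < (G.length : Int)

instance (G : List (List (List Int))) : Decidable (Pre_maxDConnectedArea G) := by
  unfold Pre_maxDConnectedArea; infer_instance

def pvWitness_maxDConnectedArea : List (List (List Int)) := [[[], [1, -1]], [[], [0]]]

def Spec_maxDConnectedArea (G : List (List (List Int))) (out : Int) : Prop := out = maxDConnectedArea_alt G
instance (G : List (List (List Int))) (out : Int) : Decidable (Spec_maxDConnectedArea G out) := by unfold Spec_maxDConnectedArea; infer_instance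

-- ===== CLAIM (what is proved, stated in full; the proofs are below) =====
def Claim_equal_maxDConnectedArea : Prop := ∀ (G : List (List (List Int))), Dom_maxDConnectedArea G → Pre_maxDConnectedArea G → Spec_maxDConnectedArea G (maxDConnectedArea G)

-- ===== LEMMAS AND PROOFS =====

-- step relation and reachability over the labels both traversals explore
def stepR (G : List (List (List Int))) (a b : Int) : Prop := b ∈ succOf G a
def reach (G : List (List (List Int))) : Int → Int → Prop := Relation.ReflTransGen (stepR G)

theorem set_add_of_not_mem {v : List Int} {j : Int} (h : j ∉ v) :
    PySem.Set.add v j = v ++ [j] := by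
  simp [PySem.Set.add]
  intro hc
  exact absurd hc h

theorem nodup_append_not_mem {v : List Int} {j : Int} (hn : v.Nodup) (h : j ∉ v) :
    (v ++ [j]).Nodup := by
  simp only [List.nodup_append, List.nodup_cons]
  exact ⟨hn, by simp, fun a ha b hb => by simp at hb; subst hb; exact fun he => h (he ▸ ha)⟩

-- counting: a nodup subset at least as long contains everything
theorem mem_of_nodup_subset_length {v U : List Int} (hn : v.Nodup) (hsub : v ⊆ U)
    (hlen : U.length ≤ v.length) : ∀ x ∈ U, x ∈ v := by
  intro x hx
  have h1 : v.toFinset ⊆ U.toFinset := by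
    intro a ha; simp only [List.mem_toFinset] at *; exact hsub ha
  have hcv : v.toFinset.card = v.length := List.toFinset_card_of_nodup hn
  have hcu : U.toFinset.card ≤ U.length := U.toFinset_card_le
  have : U.toFinset = v.toFinset :=
    (Finset.eq_of_subset_of_card_le h1 (by omega)).symm
  have : x ∈ v.toFinset := by rw [← this]; simp [hx]
  simpa using this

-- the big DFS invariant lemma
theorem dfsA_main (G : List (List (List Int))) (U : List Int)
    (hS : ∀ a : Int, succOf G a ⊆ U) (_hU : U.Nodup) :
    ∀ (fuel : Nat) (i : Int) (vis : List Int), vis.Nodup → vis ⊆ U → i ∈ vis →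
      U.length ≤ fuel + vis.length →
      vis ⊆ dfsA G fuel i vis ∧ (dfsA G fuel i vis).Nodup ∧ dfsA G fuel i vis ⊆ U ∧
      succOf G i ⊆ dfsA G fuel i vis ∧
      (∀ x ∈ dfsA G fuel i vis, x ∉ vis → succOf G x ⊆ dfsA G fuel i vis) ∧
      (∀ x ∈ dfsA G fuel i vis, x ∈ vis ∨ reach G i x) := by
  intro fuel
  induction fuel with
  | zero =>
    intro i vis hn hsub hi hlen
    simp only [dfsA]
    refine ⟨List.Subset.refl _, hn, hsub, ?_, ?_, ?_⟩
    · intro x hx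
      exact mem_of_nodup_subset_length hn hsub (by omega) x (hS i hx)
    · intro x hx hnx; exact absurd hx hnx
    · intro x hx; exact Or.inl hx
  | succ fuel IH =>
    intro i vis hn hsub hi hlen
    -- inner fold lemma over the successor list
    have inner : ∀ (l : List Int), l ⊆ U → ∀ v, v.Nodup → v ⊆ U →
        U.length ≤ fuel + 1 + v.length →
        let fl := l.foldl (fun v j => if j ∈ v then v else dfsA G fuel j (PySem.Set.add v j)) v
        v ⊆ fl ∧ fl.Nodup ∧ fl ⊆ U ∧ l ⊆ fl ∧
        (∀ x ∈ fl, x ∉ v → succOf G x ⊆ fl) ∧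
        (∀ x ∈ fl, x ∈ v ∨ ∃ j ∈ l, reach G j x) := by
      intro l
      induction l with
      | nil =>
        intro _ v hvn hvU hvlen
        refine ⟨List.Subset.refl _, hvn, hvU, by simp, ?_, fun x hx => Or.inl hx⟩
        intro x hx hnx; exact absurd hx hnx
      | cons j l' IHl =>
        intro hlU v hvn hvU hvlen
        simp only [List.foldl_cons]
        by_cases hj : j ∈ v
        · simp only [if_pos hj]
          obtain ⟨c1, c2, c3, c4, c5, c6⟩ :=
            IHl (fun x hx => hlU (List.mem_cons_of_mem _ hx)) v hvn hvU hvlen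
          refine ⟨c1, c2, c3, ?_, c5, ?_⟩
          · intro x hx
            rcases List.mem_cons.mp hx with rfl | hx
            · exact c1 hj
            · exact c4 hx
          · intro x hx
            rcases c6 x hx with h | ⟨a, ha, hr⟩
            · exact Or.inl h
            · exact Or.inr ⟨a, List.mem_cons_of_mem _ ha, hr⟩
        · simp only [if_neg hj]
          have hadd : PySem.Set.add v j = v ++ [j] := set_add_of_not_mem hj
          have haddn : (PySem.Set.add v j).Nodup := by rw [hadd]; exact nodup_append_not_mem hvn hj
          have haddsub : PySem.Set.add v j ⊆ U := by
            rw [hadd]; intro x hx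
            rcases List.mem_append.mp hx with h | h
            · exact hvU h
            · simp at h; subst h; exact hlU (List.mem_cons_self)
          have haddlen : (PySem.Set.add v j).length = v.length + 1 := by simp [hadd]
          have hjmem : j ∈ PySem.Set.add v j := by rw [hadd]; simp
          obtain ⟨a1, a2, a3, a4, a5, a6⟩ :=
            IH j (PySem.Set.add v j) haddn haddsub hjmem (by omega)
          set r₁ := dfsA G fuel j (PySem.Set.add v j) with hr₁
          have hr₁len : v.length + 1 ≤ r₁.length := by
            have h1 : (PySem.Set.add v j).toFinset ⊆ r₁.toFinset := by
              intro a ha; simp only [List.mem_toFinset] at *; exact a1 ha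
            have h2 := Finset.card_le_card h1
            rw [List.toFinset_card_of_nodup haddn] at h2
            have h3 : r₁.toFinset.card ≤ r₁.length := r₁.toFinset_card_le
            omega
          obtain ⟨c1, c2, c3, c4, c5, c6⟩ :=
            IHl (fun x hx => hlU (List.mem_cons_of_mem _ hx)) r₁ a2 a3 (by omega)
          have hvfl : v ⊆ l'.foldl _ r₁ := fun x hx => c1 (a1 (by rw [hadd]; exact List.mem_append_left _ hx))
          refine ⟨hvfl, c2, c3, ?_, ?_, ?_⟩
          · intro x hx
            rcases List.mem_cons.mp hx with rfl | hx
            · exact c1 (a1 hjmem)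
            · exact c4 hx
          · intro x hx hnx
            by_cases hx1 : x ∈ r₁
            · by_cases hxa : x ∈ PySem.Set.add v j
              · have hxj : x = j := by
                  rw [hadd] at hxa
                  rcases List.mem_append.mp hxa with h | h
                  · exact absurd h hnx
                  · simpa using h
                subst hxj
                exact fun y hy => c1 (a4 hy)
              · exact fun y hy => c1 (a5 x hx1 hxa hy)
            · exact c5 x hx hx1
          · intro x hx
            rcases c6 x hx with h | ⟨a, ha, hr⟩
            · rcases a6 x h with h' | h'
              · rw [hadd] at h'
                rcases List.mem_append.mp h' with h'' | h''
                · exact Or.inl h''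
                · simp at h''; subst h''
                  exact Or.inr ⟨x, List.mem_cons_self, Relation.ReflTransGen.refl⟩
              · exact Or.inr ⟨j, List.mem_cons_self, h'⟩
            · exact Or.inr ⟨a, List.mem_cons_of_mem _ ha, hr⟩
    simp only [dfsA]
    obtain ⟨c1, c2, c3, c4, c5, c6⟩ := inner (succOf G i) (hS i) vis hn hsub (by omega)
    refine ⟨c1, c2, c3, c4, c5, ?_⟩
    intro x hx
    rcases c6 x hx with h | ⟨a, ha, hr⟩
    · exact Or.inl h
    · exact Or.inr (Relation.ReflTransGen.head ha hr)

theorem dfsA_mem (G : List (List (List Int))) (U : List Int)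
    (hS : ∀ a : Int, succOf G a ⊆ U) (hU : U.Nodup) (fuel : Nat) (i : Int)
    (hiU : i ∈ U) (hfuel : U.length ≤ fuel + 1) :
    (dfsA G fuel i [i]).Nodup ∧ ∀ x, x ∈ dfsA G fuel i [i] ↔ reach G i x := by
  obtain ⟨c1, c2, c3, c4, c5, c6⟩ :=
    dfsA_main G U hS hU fuel i [i] (by simp) (by simpa using hiU) (by simp)
      (by simpa using hfuel)
  refine ⟨c2, fun x => ⟨?_, ?_⟩⟩
  · intro hx
    rcases c6 x hx with h | h
    · simp at h; subst h; exact Relation.ReflTransGen.refl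
    · exact h
  · intro hr
    have hclosed : ∀ y ∈ dfsA G fuel i [i], succOf G y ⊆ dfsA G fuel i [i] := by
      intro y hy
      by_cases h : y ∈ ([i] : List Int)
      · simp at h; subst h; exact c4
      · exact c5 y hy h
    induction hr with
    | refl => exact c1 (by simp)
    | tail h1 h2 ih => exact hclosed _ ih h2

-- adding a whole list of elements to a PySem.Set: it grows by a fresh suffix drawn from xs
theorem foldl_set_add_spec (xs : List Int) : ∀ (acc : List Int),
    ∃ t, xs.foldl PySem.Set.add acc = acc ++ t ∧ (∀ x ∈ t, x ∈ xs) ∧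
      xs ⊆ acc ++ t ∧ (acc.Nodup → (acc ++ t).Nodup) := by
  induction xs with
  | nil => intro acc; exact ⟨[], by simp, by simp, by simp, by simp⟩
  | cons x xs IH =>
    intro acc
    simp only [List.foldl_cons]
    by_cases hx : x ∈ acc
    · have hadd : PySem.Set.add acc x = acc := by simp [PySem.Set.add, hx]
      obtain ⟨t, h1, h2, h3, h4⟩ := IH acc
      rw [hadd]
      refine ⟨t, h1, fun y hy => List.mem_cons_of_mem _ (h2 y hy), ?_, h4⟩
      intro y hy
      rcases List.mem_cons.mp hy with rfl | hy
      · exact List.mem_append_left _ hx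
      · exact h3 hy
    · have hadd : PySem.Set.add acc x = acc ++ [x] := set_add_of_not_mem hx
      obtain ⟨t, h1, h2, h3, h4⟩ := IH (acc ++ [x])
      rw [hadd]
      refine ⟨x :: t, by simpa using h1, ?_, ?_, ?_⟩
      · intro y hy
        rcases List.mem_cons.mp hy with rfl | hy
        · exact List.mem_cons_self
        · exact List.mem_cons_of_mem _ (h2 y hy)
      · intro y hy
        rcases List.mem_cons.mp hy with rfl | hy
        · simp
        · have := h3 hy; simpa using this
      · intro hn
        have := h4 (nodup_append_not_mem hn hx)
        simpa using this

-- one saturation round: grows vis by a fresh suffix of successors, and afterwards the successors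
-- of every old member are inside
theorem satStep_spec (G : List (List (List Int))) (vis : List Int) :
    ∃ t, satStep G vis = vis ++ t ∧ (∀ x ∈ t, ∃ j ∈ vis, x ∈ succOf G j) ∧
      (∀ j ∈ vis, succOf G j ⊆ vis ++ t) ∧ (vis.Nodup → (vis ++ t).Nodup) := by
  unfold satStep
  have gen : ∀ (l : List Int) (acc : List Int),
      ∃ t, l.foldl (fun acc j => (succOf G j).foldl PySem.Set.add acc) acc = acc ++ t ∧
        (∀ x ∈ t, ∃ j ∈ l, x ∈ succOf G j) ∧
        (∀ j ∈ l, succOf G j ⊆ acc ++ t) ∧ (acc.Nodup → (acc ++ t).Nodup) := by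
    intro l
    induction l with
    | nil => intro acc; exact ⟨[], by simp, by simp, by simp, by simp⟩
    | cons j l' IHl =>
      intro acc
      simp only [List.foldl_cons]
      obtain ⟨t1, e1, m1, s1, n1⟩ := foldl_set_add_spec (succOf G j) acc
      rw [e1]
      obtain ⟨t2, e2, m2, s2, n2⟩ := IHl (acc ++ t1)
      rw [e2]
      refine ⟨t1 ++ t2, by simp, ?_, ?_, ?_⟩
      · intro x hx
        rcases List.mem_append.mp hx with h | h
        · exact ⟨j, List.mem_cons_self, m1 x h⟩
        · obtain ⟨a, ha, hs⟩ := m2 x h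
          exact ⟨a, List.mem_cons_of_mem _ ha, hs⟩
      · intro a ha
        rcases List.mem_cons.mp ha with rfl | ha
        · intro y hy
          have := s1 hy
          rw [List.append_assoc] at *
          rcases List.mem_append.mp this with h | h
          · exact List.mem_append_left _ h
          · exact List.mem_append_right _ (List.mem_append_left _ h)
        · intro y hy
          have := s2 a ha hy
          simpa [List.append_assoc] using this
      · intro hn
        have := n2 (n1 hn)
        simpa [List.append_assoc] using this
  exact gen vis vis

-- the saturation loop: with enough fuel it reaches the set of labels reachable from vis,
-- closed under succOf
theorem satB_main (G : List (List (List Int))) (U : List Int)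
    (hS : ∀ a : Int, succOf G a ⊆ U) (_hU : U.Nodup) :
    ∀ (fuel : Nat) (vis : List Int), vis.Nodup → vis ⊆ U →
      U.length ≤ fuel + vis.length →
      vis ⊆ satB G fuel vis ∧ (satB G fuel vis).Nodup ∧ satB G fuel vis ⊆ U ∧
      (∀ x ∈ satB G fuel vis, succOf G x ⊆ satB G fuel vis) ∧
      (∀ x ∈ satB G fuel vis, ∃ a ∈ vis, reach G a x) := by
  intro fuel
  induction fuel with
  | zero =>
    intro vis hn hsub hlen
    simp only [satB]
    refine ⟨List.Subset.refl _, hn, hsub, ?_, ?_⟩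
    · intro x hx y hy
      exact mem_of_nodup_subset_length hn hsub (by omega) y (hS x hy)
    · intro x hx; exact ⟨x, hx, Relation.ReflTransGen.refl⟩
  | succ fuel IH =>
    intro vis hn hsub hlen
    simp only [satB]
    obtain ⟨t, he, hm, hcl, hnd⟩ := satStep_spec G vis
    by_cases hfix : satStep G vis = vis
    · simp only [if_pos hfix]
      refine ⟨List.Subset.refl _, hn, hsub, ?_, ?_⟩
      · intro x hx
        have := hcl x hx
        rw [← he, hfix] at this
        exact this
      · intro x hx; exact ⟨x, hx, Relation.ReflTransGen.refl⟩
    · simp only [if_neg hfix]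
      have ht : t ≠ [] := by
        intro h; subst h; simp at he; exact hfix he
      have hnew_nodup : (satStep G vis).Nodup := by rw [he]; exact hnd hn
      have hnew_sub : satStep G vis ⊆ U := by
        rw [he]; intro x hx
        rcases List.mem_append.mp hx with h | h
        · exact hsub h
        · obtain ⟨a, _, hs⟩ := hm x h
          exact hS a hs
      have hlen' : vis.length + 1 ≤ (satStep G vis).length := by
        rw [he]
        have : 1 ≤ t.length := by
          cases t with
          | nil => exact absurd rfl ht
          | cons _ _ => simp
        simp; omega
      obtain ⟨d1, d2, d3, d4, d5⟩ := IH (satStep G vis) hnew_nodup hnew_sub (by omega)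
      refine ⟨?_, d2, d3, d4, ?_⟩
      · intro x hx
        exact d1 (by rw [he]; exact List.mem_append_left _ hx)
      · intro x hx
        obtain ⟨a, ha, hr⟩ := d5 x hx
        rw [he] at ha
        rcases List.mem_append.mp ha with h | h
        · exact ⟨a, h, hr⟩
        · obtain ⟨b, hb, hs⟩ := hm a h
          exact ⟨b, hb, Relation.ReflTransGen.head hs hr⟩

theorem satB_mem (G : List (List (List Int))) (U : List Int)
    (hS : ∀ a : Int, succOf G a ⊆ U) (hU : U.Nodup) (fuel : Nat) (i : Int)
    (hiU : i ∈ U) (hfuel : U.length ≤ fuel + 1) :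
    (satB G fuel [i]).Nodup ∧ ∀ x, x ∈ satB G fuel [i] ↔ reach G i x := by
  obtain ⟨c1, c2, c3, c4, c5⟩ :=
    satB_main G U hS hU fuel [i] (by simp) (by simpa using hiU) (by simpa using hfuel)
  refine ⟨c2, fun x => ⟨?_, ?_⟩⟩
  · intro hx
    obtain ⟨a, ha, hr⟩ := c5 x hx
    simp at ha; subst ha; exact hr
  · intro hr
    induction hr with
    | refl => exact c1 (by simp)
    | tail h1 h2 ih => exact c4 _ ih h2

-- under Pre_, every successor label lies in [-n, n)
theorem succOf_subset (G : List (List (List Int))) (hpre : Pre_maxDConnectedArea G)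
    (a : Int) : ∀ b ∈ succOf G a,
      -(G.length : Int) ≤ b ∧ b < (G.length : Int) := by
  intro b hb
  unfold succOf at hb
  by_cases h : PySem.Raise.InRange G.length a
  · have hrow : PySem.List.pyGetD G a [] ∈ G := PySem.List.pyGetD_mem G [] h
    exact (hpre _ hrow).2 b hb
  · have hnone : PySem.List.pyGet? G a = none := (PySem.List.pyGet?_eq_none_iff G a).mpr h
    rw [PySem.List.pyGetD_of_none G a [] hnone] at hb
    simp [PySem.List.pyGetD, PySem.List.pyGet?] at hb

-- equality of the two per-source counts, for every source label
theorem per_source_eq (G : List (List (List Int))) (hpre : Pre_maxDConnectedArea G)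
    (i : Int) :
    (dfsA G (2*G.length+2) i [i]).length = (satB G (2*G.length+2) [i]).length := by
  set n := G.length with hn
  set U := PySem.Set.add (PySem.List.pyRange (-(n : Int)) (n : Int) 1) i with hUdef
  have hSsub : ∀ a : Int, succOf G a ⊆ U := by
    intro a b hb
    have := succOf_subset G hpre a b hb
    rw [hUdef, PySem.Set.mem_add]
    exact Or.inl ((PySem.List.mem_pyRange_one).mpr this)
  have hUnodup : U.Nodup := PySem.Set.nodup_add _ _ (PySem.List.nodup_pyRange_one _ _)
  have hiU : i ∈ U := by rw [hUdef, PySem.Set.mem_add]; exact Or.inr rfl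
  have hUlen : U.length ≤ 2*n + 1 := by
    have h1 : (PySem.List.pyRange (-(n : Int)) (n : Int) 1).length = 2*n := by
      rw [PySem.List.length_pyRange_one]; omega
    rw [hUdef]
    unfold PySem.Set.add
    split
    · omega
    · simp [h1]
  obtain ⟨hna, hma⟩ := dfsA_mem G U hSsub hUnodup (2*n+2) i hiU (by omega)
  obtain ⟨hnb, hmb⟩ := satB_mem G U hSsub hUnodup (2*n+2) i hiU (by omega)
  have hperm : List.Perm (dfsA G (2*n+2) i [i]) (satB G (2*n+2) [i]) := by
    rw [List.perm_ext_iff_of_nodup hna hnb]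
    intro a; rw [hma, hmb]
  exact hperm.length_eq

-- ===== VERDICT (by name: the statement is the Claim_ definition above) =====
theorem maxDConnectedArea_spec : Claim_equal_maxDConnectedArea := by
  intro G _ hpre
  unfold Spec_maxDConnectedArea maxDConnectedArea maxDConnectedArea_alt
  simp only []
  have hfun : (fun (ans : Int) (i : Int) => max ans ((dfsA G (2*G.length+2) i [i]).length : Int))
      = (fun (ans : Int) (i : Int) => max ans ((satB G (2*G.length+2) [i]).length : Int)) := by
    funext ans i
    rw [per_source_eq G hpre i]
  rw [hfun]
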